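-- pv_equiv track=rewrite | github.com/fenghaitao/simics-7-packages-2025-38-linux64 | simics-7.57.0/linux64/lib/python-py3/table/border.py | _row_separator_up_down
-- ===== SOURCE A (Python) =====
-- def _row_separator_up_down(up_widths, down_widths,
--                           left_char,
--                           dash_char,
--                           conn_up_char,
--                           conn_down_char,
--                           conn_both_char,
--                           right_char):
--
--     # Returns a set where the separators should be positioned:
--     # widths [10, 5, 7] -> (10, 16, 24)
--     def separator_set(widths):
--         start = 0
--         s = set()
--         for w in widths:
--             # assumption col sep and conns have same width
--             col_sep_len = len(conn_both_char)
--             start += w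
--             s.add(start + 1)
--             start += col_sep_len
--         return s
--
--     up_seps = separator_set(up_widths)
--     down_seps = separator_set(down_widths)
--     seps = sorted(up_seps.union(down_seps))
--     s = left_char
--     prev = 0
--     for sep in seps:
--         s += dash_char * (sep - prev - 1)
--         if sep == list(seps)[-1]: # Last
--             s += right_char
--         elif sep in up_seps and sep in down_seps:
--             s += conn_both_char
--         elif sep in up_seps:
--             s += conn_up_char
--         else:
--             s += conn_down_char
--         prev = sep + len(conn_both_char) - 1
--
--     if not s.strip(): # Remove border-less lines
--         return ""
--     return s + "\n"
-- ===== SOURCE B (Python) =====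
-- def _row_separator_up_down(up_widths, down_widths,
--                            left_char,
--                            dash_char,
--                            conn_up_char,
--                            conn_down_char,
--                            conn_both_char,
--                            right_char):
--     L = len(conn_both_char)
--
--     # Sorted, duplicate-free boundary positions of one width list.
--     def positions(widths):
--         start = 0
--         out = []
--         for w in widths:
--             start += w
--             out.append(start + 1)
--             start += L
--         return sorted(set(out))
--
--     U = positions(up_widths)
--     D = positions(down_widths)
--     parts = [left_char]
--     prev = 0
--     i = j = 0
--     # Two-pointer merge of the two increasing sequences.
--     while i < len(U) or j < len(D):
--         in_u = i < len(U) and (j >= len(D) or U[i] <= D[j])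
--         in_d = j < len(D) and (i >= len(U) or D[j] <= U[i])
--         sep = U[i] if in_u else D[j]
--         if in_u:
--             i += 1
--         if in_d:
--             j += 1
--         parts.append(dash_char * (sep - prev - 1))
--         if i == len(U) and j == len(D):
--             parts.append(right_char)
--         elif in_u and in_d:
--             parts.append(conn_both_char)
--         elif in_u:
--             parts.append(conn_up_char)
--         else:
--             parts.append(conn_down_char)
--         prev = sep + L - 1
--     s = "".join(parts)
--     if not s.strip():
--         return ""
--     return s + "\n"
-- ===== Notes on version B (the rewrite author's own statement) =====
-- stated objective: alternative
-- what changed: Replaces the set-union-then-sort with per-iteration membership tests and a per-iteration list(seps)[-1] re-scan by a single two-pointer merge of the two sorted boundary sequences that classifies each connector (up/down/both/last) directly and joins collected parts once.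
import Mathlib
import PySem

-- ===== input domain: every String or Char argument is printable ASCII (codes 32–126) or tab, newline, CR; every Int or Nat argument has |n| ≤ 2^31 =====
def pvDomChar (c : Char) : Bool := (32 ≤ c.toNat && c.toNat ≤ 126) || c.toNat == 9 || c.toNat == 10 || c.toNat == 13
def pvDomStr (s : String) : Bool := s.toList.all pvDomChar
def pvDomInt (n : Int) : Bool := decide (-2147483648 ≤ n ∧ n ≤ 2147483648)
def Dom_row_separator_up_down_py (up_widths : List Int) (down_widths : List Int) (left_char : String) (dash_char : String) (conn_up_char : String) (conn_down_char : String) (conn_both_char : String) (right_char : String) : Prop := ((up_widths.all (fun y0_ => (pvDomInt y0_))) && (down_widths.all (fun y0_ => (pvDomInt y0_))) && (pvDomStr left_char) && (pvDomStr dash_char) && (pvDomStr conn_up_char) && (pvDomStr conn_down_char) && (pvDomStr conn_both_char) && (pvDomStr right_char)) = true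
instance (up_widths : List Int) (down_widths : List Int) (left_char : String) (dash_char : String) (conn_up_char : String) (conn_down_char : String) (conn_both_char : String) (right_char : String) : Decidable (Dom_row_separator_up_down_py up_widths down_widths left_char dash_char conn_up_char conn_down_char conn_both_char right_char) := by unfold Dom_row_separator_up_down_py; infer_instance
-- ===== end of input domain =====

-- B replaces A's set-union + sort + per-separator membership/last-element scans by a single
-- two-pointer merge of the two sorted boundary sequences (alternative decomposition, same result).
-- ===== PORT A =====
-- Python's  s * n  (string repetition), shared by both ports; the empty-string branch only
-- short-circuits evaluation (same value: [] * n = []), matching CPython's O(1) '' * n.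
def pvRep (cs : List Char) (n : Int) : List Char :=
  if cs = [] then [] else (List.replicate n.toNat cs).flatten

-- Port of A: builds two position sets, sorts their union, and scans it with
-- membership tests (and a last-element re-scan) to emit the connectors.
def row_separator_up_down_py (up_widths : List Int) (down_widths : List Int) (left_char : String) (dash_char : String) (conn_up_char : String) (conn_down_char : String) (conn_both_char : String) (right_char : String) : String :=
  let csl : Int := (conn_both_char.toList.length : Int)
  let separator_set : List Int → PySem.Set Int := fun widths =>
    (widths.foldl (fun (st : Int × PySem.Set Int) w =>
        (st.1 + w + csl, PySem.Set.add st.2 (st.1 + w + 1))) (0, PySem.Set.empty)).2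
  let up_seps := separator_set up_widths
  let down_seps := separator_set down_widths
  let seps := PySem.List.sorted (PySem.Set.union up_seps down_seps) (fun x => x) false
  let r := seps.foldl (fun (st : List Char × Int) sep =>
      let s := st.1 ++ pvRep dash_char.toList (sep - st.2 - 1)
      let s :=
        if PySem.List.pyGet? seps (-1) = some sep then s ++ right_char.toList
        else if PySem.Set.contains up_seps sep && PySem.Set.contains down_seps sep then
          s ++ conn_both_char.toList
        else if PySem.Set.contains up_seps sep then s ++ conn_up_char.toList
        else s ++ conn_down_char.toList
      (s, sep + csl - 1)) (left_char.toList, (0 : Int))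
  if PySem.Chars.strip r.1 = [] then "" else String.ofList (r.1 ++ ['\n'])

-- ===== PORT B =====
-- B's two-pointer merge of the two increasing boundary sequences (the while loop of Source B:
-- in_u / in_d are the head comparisons; each step emits the dash run and one connector).
def pvAltMerge (dash cu cd cb rt : List Char) (L : Int) : List Int → List Int → Int → List (List Char)
  | [], [], _ => []
  | u :: U', [], prev =>
      pvRep dash (u - prev - 1) ::
        (if U' = [] then rt else cu) :: pvAltMerge dash cu cd cb rt L U' [] (u + L - 1)
  | [], d :: D', prev =>
      pvRep dash (d - prev - 1) ::
        (if D' = [] then rt else cd) :: pvAltMerge dash cu cd cb rt L [] D' (d + L - 1)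
  | u :: U', d :: D', prev =>
      if u < d then
        pvRep dash (u - prev - 1) ::
          cu :: pvAltMerge dash cu cd cb rt L U' (d :: D') (u + L - 1)
      else if d < u then
        pvRep dash (d - prev - 1) ::
          cd :: pvAltMerge dash cu cd cb rt L (u :: U') D' (d + L - 1)
      else
        pvRep dash (u - prev - 1) ::
          (if U' = [] ∧ D' = [] then rt else cb) :: pvAltMerge dash cu cd cb rt L U' D' (u + L - 1)
  termination_by U D _ => U.length + D.length

def row_separator_up_down_py_alt (up_widths : List Int) (down_widths : List Int) (left_char : String) (dash_char : String) (conn_up_char : String) (conn_down_char : String) (conn_both_char : String) (right_char : String) : String :=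
  let L : Int := (conn_both_char.toList.length : Int)
  let positions : List Int → List Int := fun widths =>
    PySem.List.sorted
      (PySem.Set.ofList
        ((widths.foldl (fun (st : Int × List Int) w =>
            (st.1 + w + L, st.2 ++ [st.1 + w + 1])) ((0 : Int), ([] : List Int))).2))
      (fun x => x) false
  let U := positions up_widths
  let D := positions down_widths
  let parts := left_char.toList ::
    pvAltMerge dash_char.toList conn_up_char.toList conn_down_char.toList
      conn_both_char.toList right_char.toList L U D 0
  let s := PySem.Chars.join [] parts
  if PySem.Chars.strip s = [] then "" else String.ofList (s ++ ['\n'])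

-- ===== PRECONDITION & SPEC =====
def Spec_row_separator_up_down_py (up_widths : List Int) (down_widths : List Int) (left_char : String) (dash_char : String) (conn_up_char : String) (conn_down_char : String) (conn_both_char : String) (right_char : String) (out : String) : Prop := out = row_separator_up_down_py_alt up_widths down_widths left_char dash_char conn_up_char conn_down_char conn_both_char right_char
instance (up_widths : List Int) (down_widths : List Int) (left_char : String) (dash_char : String) (conn_up_char : String) (conn_down_char : String) (conn_both_char : String) (right_char : String) (out : String) : Decidable (Spec_row_separator_up_down_py up_widths down_widths left_char dash_char conn_up_char conn_down_char conn_both_char right_char out) := by unfold Spec_row_separator_up_down_py; infer_instance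

-- ===== CLAIM (what is proved, stated in full; the proofs are below) =====
def Claim_equal_row_separator_up_down_py : Prop := ∀ (up_widths : List Int) (down_widths : List Int) (left_char : String) (dash_char : String) (conn_up_char : String) (conn_down_char : String) (conn_both_char : String) (right_char : String), Dom_row_separator_up_down_py up_widths down_widths left_char dash_char conn_up_char conn_down_char conn_both_char right_char → Spec_row_separator_up_down_py up_widths down_widths left_char dash_char conn_up_char conn_down_char conn_both_char right_char (row_separator_up_down_py up_widths down_widths left_char dash_char conn_up_char conn_down_char conn_both_char right_char)

-- ===== LEMMAS AND PROOFS =====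

def pvMKeys : List Int → List Int → List Int
  | [], [] => []
  | u :: U', [] => u :: pvMKeys U' []
  | [], d :: D' => d :: pvMKeys [] D'
  | u :: U', d :: D' =>
      if u < d then u :: pvMKeys U' (d :: D')
      else if d < u then d :: pvMKeys (u :: U') D'
      else u :: pvMKeys U' D'
  termination_by U D => U.length + D.length

theorem pvMKeys_nil_right (U : List Int) : pvMKeys U [] = U := by
  induction U with
  | nil => simp [pvMKeys]
  | cons u U' ih => rw [show pvMKeys (u::U') [] = u :: pvMKeys U' [] from by simp [pvMKeys], ih]

theorem pvMKeys_nil_left (D : List Int) : pvMKeys [] D = D := by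
  cases D with
  | nil => simp [pvMKeys]
  | cons d D' => rw [show pvMKeys [] (d::D') = d :: pvMKeys [] D' from by simp [pvMKeys], pvMKeys_nil_left]


theorem mem_pvMKeys (U D : List Int) (x : Int) : x ∈ pvMKeys U D ↔ x ∈ U ∨ x ∈ D := by
  fun_induction pvMKeys U D with
  | case6 u U' d D' h h2 ih =>
      have : u = d := by omega
      subst this
      simp_all; tauto
  | _ => simp_all; try tauto

theorem pairwise_pvMKeys (U D : List Int) (hU : U.Pairwise (· < ·)) (hD : D.Pairwise (· < ·)) :
    (pvMKeys U D).Pairwise (· < ·) := by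
  fun_induction pvMKeys U D with
  | case1 => simp
  | case2 u U' ih =>
      simp_all [List.pairwise_cons, mem_pvMKeys]
  | case3 d D' ih =>
      simp_all [List.pairwise_cons, mem_pvMKeys]
  | case4 u U' d D' h ih =>
      simp_all [List.pairwise_cons, mem_pvMKeys]
      rintro x (hx | rfl | hx) <;> [exact hU.1 x hx; exact h; exact lt_trans h (hD.1 x hx)]
  | case5 u U' d D' h h2 ih =>
      simp_all [List.pairwise_cons, mem_pvMKeys]
      rintro x ((rfl | hx) | hx) <;> [exact h2; exact lt_trans h2 (hU.1 x hx); exact hD.1 x hx]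
  | case6 u U' d D' h h2 ih =>
      have : u = d := by omega
      subst this
      simp_all [List.pairwise_cons, mem_pvMKeys]
      rintro x (hx | hx) <;> [exact hU.1 x hx; exact hD.1 x hx]

def pvStep (dash rt cb cu cd : List Char) (L : Int) (Su Sd : PySem.Set Int) (lst : Option Int)
    (st : List Char × Int) (sep : Int) : List Char × Int :=
  let s := st.1 ++ pvRep dash (sep - st.2 - 1)
  let s :=
    if lst = some sep then s ++ rt
    else if PySem.Set.contains Su sep && PySem.Set.contains Sd sep then s ++ cb
    else if PySem.Set.contains Su sep then s ++ cu
    else s ++ cd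
  (s, sep + L - 1)

theorem main_fold (dash cu cd cb rt : List Char) (L : Int) (Su Sd : PySem.Set Int)
    (U D : List Int) :
    ∀ (prev : Int) (acc : List Char) (b : Int) (lst : Option Int),
    U.Pairwise (· < ·) → D.Pairwise (· < ·) →
    (∀ x ∈ U, b < x) → (∀ x ∈ D, b < x) →
    (∀ x ∈ U, x ∈ Su) → (∀ x ∈ D, x ∈ Sd) →
    (∀ x ∈ Su, x ∈ U ∨ x ≤ b) → (∀ x ∈ Sd, x ∈ D ∨ x ≤ b) →
    (pvMKeys U D ≠ [] → (pvMKeys U D).getLast? = lst) →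
    ((pvMKeys U D).foldl (pvStep dash rt cb cu cd L Su Sd lst) (acc, prev)).1
    = acc ++ (pvAltMerge dash cu cd cb rt L U D prev).flatten := by
  fun_induction pvMKeys U D with
  | case1 =>
      intro prev acc b lst _ _ _ _ _ _ _ _ _
      simp [pvAltMerge]
  | case2 u U' ih =>
      intro prev acc b lst hU hD hbU hbD hUS hDS hSU hSD hlast
      rw [pvMKeys_nil_right] at hlast ⊢
      rw [List.foldl_cons]
      have hmemSu : u ∈ Su := hUS u (by simp)
      have hmemSd : u ∉ Sd := by
        intro hmem2
        rcases hSD u hmem2 with h | h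
        · simp at h
        · have := hbU u (by simp); omega
      rcases eq_or_ne U' [] with rfl | hne
      · have hl : lst = some u := by simpa using (hlast (by simp)).symm
        rw [show pvStep dash rt cb cu cd L Su Sd lst (acc, prev) u
              = (acc ++ (pvRep dash (u - prev - 1) ++ rt), u + L - 1)
            from by simp [pvStep, hl]]
        simp [pvAltMerge]
      · obtain ⟨v, V, rfl⟩ := List.exists_cons_of_ne_nil hne
        have hlast' : (v :: V).getLast? = lst := by
          have := hlast (by simp)
          rwa [List.getLast?_cons_cons] at this
        obtain ⟨m, hm⟩ := Option.ne_none_iff_exists'.mp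
          (by simp [List.getLast?_eq_none_iff] : (v :: V).getLast? ≠ none)
        have hmm : m ∈ v :: V := List.mem_of_getLast? hm
        have hlt : u < m := (List.pairwise_cons.mp hU).1 m hmm
        have htest : ¬ (lst = some u) := by rw [← hlast', hm]; simp; omega
        rw [show pvStep dash rt cb cu cd L Su Sd lst (acc, prev) u
              = (acc ++ (pvRep dash (u - prev - 1) ++ cu), u + L - 1)
            from by simp [pvStep, htest, hmemSu, hmemSd]]
        rw [show pvAltMerge dash cu cd cb rt L (u :: v :: V) [] prev
              = pvRep dash (u - prev - 1) :: cu :: pvAltMerge dash cu cd cb rt L (v :: V) [] (u + L - 1)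
            from by simp [pvAltMerge, hne]]
        have ih' := ih (u + L - 1) (acc ++ (pvRep dash (u - prev - 1) ++ cu)) u lst
              (List.pairwise_cons.mp hU).2 hD
              (fun x hx => (List.pairwise_cons.mp hU).1 x hx) (by simp)
              (fun x hx => hUS x (List.mem_cons_of_mem _ hx)) (by simp)
              (fun x hx => by
                rcases hSU x hx with h | h
                · rw [List.mem_cons] at h
                  rcases h with rfl | h
                  · right; omega
                  · left; exact h
                · right; have := hbU u (by simp); omega)
              (fun x hx => by
                rcases hSD x hx with h | h
                · simp at h
                · right; have := hbU u (by simp); omega)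
              (by rw [pvMKeys_nil_right]; intro _; exact hlast')
        rw [pvMKeys_nil_right] at ih'
        rw [ih']
        simp
  | case3 d D' ih =>
      intro prev acc b lst hU hD hbU hbD hUS hDS hSU hSD hlast
      rw [pvMKeys_nil_left] at hlast ⊢
      rw [List.foldl_cons]
      have hmemSd : d ∈ Sd := hDS d (by simp)
      have hmemSu : d ∉ Su := by
        intro hmem2
        rcases hSU d hmem2 with h | h
        · simp at h
        · have := hbD d (by simp); omega
      rcases eq_or_ne D' [] with rfl | hne
      · have hl : lst = some d := by simpa using (hlast (by simp)).symm
        rw [show pvStep dash rt cb cu cd L Su Sd lst (acc, prev) d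
              = (acc ++ (pvRep dash (d - prev - 1) ++ rt), d + L - 1)
            from by simp [pvStep, hl]]
        simp [pvAltMerge]
      · obtain ⟨v, V, rfl⟩ := List.exists_cons_of_ne_nil hne
        have hlast' : (v :: V).getLast? = lst := by
          have := hlast (by simp)
          rwa [List.getLast?_cons_cons] at this
        obtain ⟨m, hm⟩ := Option.ne_none_iff_exists'.mp
          (by simp [List.getLast?_eq_none_iff] : (v :: V).getLast? ≠ none)
        have hmm : m ∈ v :: V := List.mem_of_getLast? hm
        have hlt : d < m := (List.pairwise_cons.mp hD).1 m hmm
        have htest : ¬ (lst = some d) := by rw [← hlast', hm]; simp; omega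
        rw [show pvStep dash rt cb cu cd L Su Sd lst (acc, prev) d
              = (acc ++ (pvRep dash (d - prev - 1) ++ cd), d + L - 1)
            from by simp [pvStep, htest, hmemSu, hmemSd]]
        rw [show pvAltMerge dash cu cd cb rt L [] (d :: v :: V) prev
              = pvRep dash (d - prev - 1) :: cd :: pvAltMerge dash cu cd cb rt L [] (v :: V) (d + L - 1)
            from by simp [pvAltMerge, hne]]
        have ih' := ih (d + L - 1) (acc ++ (pvRep dash (d - prev - 1) ++ cd)) d lst
              hU (List.pairwise_cons.mp hD).2
              (by simp) (fun x hx => (List.pairwise_cons.mp hD).1 x hx)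
              (by simp) (fun x hx => hDS x (List.mem_cons_of_mem _ hx))
              (fun x hx => by
                rcases hSU x hx with h | h
                · simp at h
                · right; have := hbD d (by simp); omega)
              (fun x hx => by
                rcases hSD x hx with h | h
                · rw [List.mem_cons] at h
                  rcases h with rfl | h
                  · right; omega
                  · left; exact h
                · right; have := hbD d (by simp); omega)
              (by rw [pvMKeys_nil_left]; intro _; exact hlast')
        rw [pvMKeys_nil_left] at ih'
        rw [ih']
        simp
  | case4 u U' d D' h ih =>
      intro prev acc b lst hU hD hbU hbD hUS hDS hSU hSD hlast
      rw [List.foldl_cons]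
      have hmemSu : u ∈ Su := hUS u (by simp)
      have hmemSd : u ∉ Sd := by
        intro hmem2
        rcases hSD u hmem2 with hh | hh
        · rw [List.mem_cons] at hh
          rcases hh with rfl | hh
          · omega
          · have := (List.pairwise_cons.mp hD).1 u hh; omega
        · have := hbU u (by simp); omega
      have hrne : pvMKeys U' (d :: D') ≠ [] := by
        intro hnil
        have : d ∈ pvMKeys U' (d :: D') := (mem_pvMKeys _ _ d).mpr (Or.inr (by simp))
        rw [hnil] at this; simp at this
      obtain ⟨v, V, hvV⟩ := List.exists_cons_of_ne_nil hrne
      have hlast' : (pvMKeys U' (d :: D')).getLast? = lst := by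
        have := hlast (by simp)
        rw [hvV] at this ⊢
        rwa [List.getLast?_cons_cons] at this
      obtain ⟨m, hm⟩ := Option.ne_none_iff_exists'.mp
        (by rw [hvV]; simp [List.getLast?_eq_none_iff] : (pvMKeys U' (d :: D')).getLast? ≠ none)
      have hmm : m ∈ pvMKeys U' (d :: D') := List.mem_of_getLast? hm
      have hlt : u < m := by
        rcases (mem_pvMKeys _ _ m).mp hmm with hh | hh
        · exact (List.pairwise_cons.mp hU).1 m hh
        · rw [List.mem_cons] at hh
          rcases hh with rfl | hh
          · omega
          · have := (List.pairwise_cons.mp hD).1 m hh; omega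
      have htest : ¬ (lst = some u) := by rw [← hlast', hm]; simp; omega
      rw [show pvStep dash rt cb cu cd L Su Sd lst (acc, prev) u
            = (acc ++ (pvRep dash (u - prev - 1) ++ cu), u + L - 1)
          from by simp [pvStep, htest, hmemSu, hmemSd]]
      rw [show pvAltMerge dash cu cd cb rt L (u :: U') (d :: D') prev
            = pvRep dash (u - prev - 1) :: cu :: pvAltMerge dash cu cd cb rt L U' (d :: D') (u + L - 1)
          from by simp [pvAltMerge, h]]
      have ih' := ih (u + L - 1) (acc ++ (pvRep dash (u - prev - 1) ++ cu)) u lst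
            (List.pairwise_cons.mp hU).2 hD
            (fun x hx => (List.pairwise_cons.mp hU).1 x hx)
            (fun x hx => by
              rw [List.mem_cons] at hx
              rcases hx with rfl | hx
              · omega
              · have := (List.pairwise_cons.mp hD).1 x hx; omega)
            (fun x hx => hUS x (List.mem_cons_of_mem _ hx)) hDS
            (fun x hx => by
              rcases hSU x hx with hh | hh
              · rw [List.mem_cons] at hh
                rcases hh with rfl | hh
                · right; omega
                · left; exact hh
              · right; have := hbU u (by simp); omega)
            (fun x hx => by
              rcases hSD x hx with hh | hh
              · left; exact hh
              · right; have := hbU u (by simp); omega)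
            (fun _ => hlast')
      rw [ih']
      simp
  | case5 u U' d D' h h2 ih =>
      intro prev acc b lst hU hD hbU hbD hUS hDS hSU hSD hlast
      rw [List.foldl_cons]
      have hmemSd : d ∈ Sd := hDS d (by simp)
      have hmemSu : d ∉ Su := by
        intro hmem2
        rcases hSU d hmem2 with hh | hh
        · rw [List.mem_cons] at hh
          rcases hh with rfl | hh
          · omega
          · have := (List.pairwise_cons.mp hU).1 d hh; omega
        · have := hbD d (by simp); omega
      have hrne : pvMKeys (u :: U') D' ≠ [] := by
        intro hnil
        have : u ∈ pvMKeys (u :: U') D' := (mem_pvMKeys _ _ u).mpr (Or.inl (by simp))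
        rw [hnil] at this; simp at this
      obtain ⟨v, V, hvV⟩ := List.exists_cons_of_ne_nil hrne
      have hlast' : (pvMKeys (u :: U') D').getLast? = lst := by
        have := hlast (by simp)
        rw [hvV] at this ⊢
        rwa [List.getLast?_cons_cons] at this
      obtain ⟨m, hm⟩ := Option.ne_none_iff_exists'.mp
        (by rw [hvV]; simp [List.getLast?_eq_none_iff] : (pvMKeys (u :: U') D').getLast? ≠ none)
      have hmm : m ∈ pvMKeys (u :: U') D' := List.mem_of_getLast? hm
      have hlt : d < m := by
        rcases (mem_pvMKeys _ _ m).mp hmm with hh | hh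
        · rw [List.mem_cons] at hh
          rcases hh with rfl | hh
          · omega
          · have := (List.pairwise_cons.mp hU).1 m hh; omega
        · exact (List.pairwise_cons.mp hD).1 m hh
      have htest : ¬ (lst = some d) := by rw [← hlast', hm]; simp; omega
      rw [show pvStep dash rt cb cu cd L Su Sd lst (acc, prev) d
            = (acc ++ (pvRep dash (d - prev - 1) ++ cd), d + L - 1)
          from by simp [pvStep, htest, hmemSu, hmemSd]]
      rw [show pvAltMerge dash cu cd cb rt L (u :: U') (d :: D') prev
            = pvRep dash (d - prev - 1) :: cd :: pvAltMerge dash cu cd cb rt L (u :: U') D' (d + L - 1)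
          from by simp [pvAltMerge, h, h2]]
      have ih' := ih (d + L - 1) (acc ++ (pvRep dash (d - prev - 1) ++ cd)) d lst
            hU (List.pairwise_cons.mp hD).2
            (fun x hx => by
              rw [List.mem_cons] at hx
              rcases hx with rfl | hx
              · omega
              · have := (List.pairwise_cons.mp hU).1 x hx; omega)
            (fun x hx => (List.pairwise_cons.mp hD).1 x hx)
            hUS (fun x hx => hDS x (List.mem_cons_of_mem _ hx))
            (fun x hx => by
              rcases hSU x hx with hh | hh
              · left; exact hh
              · right; have := hbD d (by simp); omega)
            (fun x hx => by
              rcases hSD x hx with hh | hh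
              · rw [List.mem_cons] at hh
                rcases hh with rfl | hh
                · right; omega
                · left; exact hh
              · right; have := hbD d (by simp); omega)
            (fun _ => hlast')
      rw [ih']
      simp
  | case6 u U' d D' h h2 ih =>
      intro prev acc b lst hU hD hbU hbD hUS hDS hSU hSD hlast
      have hud : u = d := by omega
      subst hud
      rw [List.foldl_cons]
      have hmemSu : u ∈ Su := hUS u (by simp)
      have hmemSd : u ∈ Sd := hDS u (by simp)
      rcases eq_or_ne (U'.length + D'.length) 0 with hz | hnz
      · have hU0 : U' = [] := by cases U' <;> simp_all
        have hD0 : D' = [] := by cases D' <;> simp_all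
        subst hU0; subst hD0
        have hl : lst = some u := by
          simpa [show pvMKeys ([] : List Int) [] = [] from by simp [pvMKeys]]
            using (hlast (by simp [pvMKeys])).symm
        rw [show pvStep dash rt cb cu cd L Su Sd lst (acc, prev) u
              = (acc ++ (pvRep dash (u - prev - 1) ++ rt), u + L - 1)
            from by simp [pvStep, hl]]
        rw [show pvAltMerge dash cu cd cb rt L [u] [u] prev
              = pvRep dash (u - prev - 1) :: rt :: pvAltMerge dash cu cd cb rt L [] [] (u + L - 1)
            from by simp [pvAltMerge]]
        simp [pvMKeys, pvAltMerge]
      · have hne : ¬ (U' = [] ∧ D' = []) := by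
          rintro ⟨rfl, rfl⟩; simp at hnz
        have hrne : pvMKeys U' D' ≠ [] := by
          intro hnil
          rcases U' with _ | ⟨v, V⟩
          · rcases D' with _ | ⟨w, W⟩
            · exact hnz (by simp)
            · have : w ∈ pvMKeys ([] : List Int) (w :: W) :=
                (mem_pvMKeys _ _ w).mpr (Or.inr (by simp))
              rw [hnil] at this; simp at this
          · have : v ∈ pvMKeys (v :: V) D' :=
              (mem_pvMKeys _ _ v).mpr (Or.inl (by simp))
            rw [hnil] at this; simp at this
        obtain ⟨v, V, hvV⟩ := List.exists_cons_of_ne_nil hrne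
        have hlast' : (pvMKeys U' D').getLast? = lst := by
          have := hlast (by simp)
          rw [hvV] at this ⊢
          rwa [List.getLast?_cons_cons] at this
        obtain ⟨m, hm⟩ := Option.ne_none_iff_exists'.mp
          (by rw [hvV]; simp [List.getLast?_eq_none_iff] : (pvMKeys U' D').getLast? ≠ none)
        have hmm : m ∈ pvMKeys U' D' := List.mem_of_getLast? hm
        have hlt : u < m := by
          rcases (mem_pvMKeys _ _ m).mp hmm with hh | hh
          · exact (List.pairwise_cons.mp hU).1 m hh
          · exact (List.pairwise_cons.mp hD).1 m hh
        have htest : ¬ (lst = some u) := by rw [← hlast', hm]; simp; omega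
        rw [show pvStep dash rt cb cu cd L Su Sd lst (acc, prev) u
              = (acc ++ (pvRep dash (u - prev - 1) ++ cb), u + L - 1)
            from by simp [pvStep, htest, hmemSu, hmemSd]]
        rw [show pvAltMerge dash cu cd cb rt L (u :: U') (u :: D') prev
              = pvRep dash (u - prev - 1) :: cb :: pvAltMerge dash cu cd cb rt L U' D' (u + L - 1)
            from by simp [pvAltMerge, hne]]
        have ih' := ih (u + L - 1) (acc ++ (pvRep dash (u - prev - 1) ++ cb)) u lst
              (List.pairwise_cons.mp hU).2 (List.pairwise_cons.mp hD).2
              (fun x hx => (List.pairwise_cons.mp hU).1 x hx)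
              (fun x hx => (List.pairwise_cons.mp hD).1 x hx)
              (fun x hx => hUS x (List.mem_cons_of_mem _ hx))
              (fun x hx => hDS x (List.mem_cons_of_mem _ hx))
              (fun x hx => by
                rcases hSU x hx with hh | hh
                · rw [List.mem_cons] at hh
                  rcases hh with rfl | hh
                  · right; omega
                  · left; exact hh
                · right; have := hbU u (by simp); omega)
              (fun x hx => by
                rcases hSD x hx with hh | hh
                · rw [List.mem_cons] at hh
                  rcases hh with rfl | hh
                  · right; omega
                  · left; exact hh
                · right; have := hbD u (by simp); omega)
              (fun _ => hlast')
        rw [ih']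
        simp

theorem pyGet?_neg_one (xs : List Int) : PySem.List.pyGet? xs (-1) = xs.getLast? := by
  rcases List.eq_nil_or_concat xs with h | ⟨ys, y, h⟩ <;> subst h
  · rfl
  · simp [PySem.List.pyGet?, PySem.List.pyIdx?]

theorem join_nil_eq_flatten (ps : List (List Char)) : PySem.Chars.join [] ps = ps.flatten := by
  simp only [PySem.Chars.join]
  induction ps with
  | nil => rfl
  | cons a t ih => cases t <;> simp_all [List.intercalate]

theorem sepset_eq_ofList (csl : Int) (widths : List Int) (st : Int) (l : List Int) :
    (widths.foldl (fun (st : Int × PySem.Set Int) w =>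
        (st.1 + w + csl, PySem.Set.add st.2 (st.1 + w + 1))) (st, PySem.Set.ofList l)).2
    = PySem.Set.ofList
        ((widths.foldl (fun (st : Int × List Int) w =>
            (st.1 + w + csl, st.2 ++ [st.1 + w + 1])) (st, l)).2) := by
  induction widths generalizing st l with
  | nil => rfl
  | cons w ws ih =>
      simp only [List.foldl_cons]
      rw [← PySem.Set.ofList_append_singleton]
      exact ih (st + w + csl) (l ++ [st + w + 1])

-- ===== VERDICT (by name: the statement is the Claim_ definition above) =====
theorem seps_eq_pvMKeys (a b : List Int) :
    PySem.List.sorted (PySem.Set.union (PySem.Set.ofList a) (PySem.Set.ofList b)) (fun x => x) false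
    = pvMKeys (PySem.List.sorted (PySem.Set.ofList a) (fun x => x) false)
        (PySem.List.sorted (PySem.Set.ofList b) (fun x => x) false) := by
  have hU := PySem.List.sorted_ofList_pairwise_lt (xs := a)
  have hD := PySem.List.sorted_ofList_pairwise_lt (xs := b)
  have hpw := pairwise_pvMKeys _ _ hU hD
  have hperm : (pvMKeys (PySem.List.sorted (PySem.Set.ofList a) (fun x => x) false)
      (PySem.List.sorted (PySem.Set.ofList b) (fun x => x) false)).Perm
      (PySem.Set.union (PySem.Set.ofList a) (PySem.Set.ofList b)) := by
    rw [List.perm_ext_iff_of_nodup (hpw.imp (fun h => Int.ne_of_lt h))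
      (PySem.Set.nodup_union _ _ (PySem.Set.nodup_ofList a))]
    intro x
    simp [mem_pvMKeys, PySem.Set.mem_union, PySem.List.mem_sorted, PySem.Set.mem_ofList]
  exact PySem.List.sorted_eq_of_perm_of_pairwise_lt _ _ _ hperm hpw

theorem row_separator_up_down_py_spec : Claim_equal_row_separator_up_down_py := by
  intro up dn lc dc cuS cdS cbS rtS _
  unfold Spec_row_separator_up_down_py
  set L : Int := (cbS.toList.length : Int) with hL
  set outU := (up.foldl (fun (st : Int × List Int) w =>
      (st.1 + w + L, st.2 ++ [st.1 + w + 1])) ((0 : Int), ([] : List Int))).2 with houtU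
  set outD := (dn.foldl (fun (st : Int × List Int) w =>
      (st.1 + w + L, st.2 ++ [st.1 + w + 1])) ((0 : Int), ([] : List Int))).2 with houtD
  set SuA := (up.foldl (fun (st : Int × PySem.Set Int) w =>
      (st.1 + w + L, PySem.Set.add st.2 (st.1 + w + 1))) ((0 : Int), PySem.Set.empty)).2 with hSuA
  set SdA := (dn.foldl (fun (st : Int × PySem.Set Int) w =>
      (st.1 + w + L, PySem.Set.add st.2 (st.1 + w + 1))) ((0 : Int), PySem.Set.empty)).2 with hSdA
  set U := PySem.List.sorted (PySem.Set.ofList outU) (fun x => x) false with hUdef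
  set D := PySem.List.sorted (PySem.Set.ofList outD) (fun x => x) false with hDdef
  set sepsA := PySem.List.sorted (PySem.Set.union SuA SdA) (fun x => x) false with hsepsA
  have hA : row_separator_up_down_py up dn lc dc cuS cdS cbS rtS
      = (fun s : List Char => if PySem.Chars.strip s = [] then "" else String.ofList (s ++ ['\n']))
        ((List.foldl (pvStep dc.toList rtS.toList cbS.toList cuS.toList cdS.toList L SuA SdA
            (PySem.List.pyGet? sepsA (-1))) (lc.toList, 0) sepsA).1) := rfl
  have hB : row_separator_up_down_py_alt up dn lc dc cuS cdS cbS rtS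
      = (fun s : List Char => if PySem.Chars.strip s = [] then "" else String.ofList (s ++ ['\n']))
        (PySem.Chars.join [] (lc.toList ::
          pvAltMerge dc.toList cuS.toList cdS.toList cbS.toList rtS.toList L U D 0)) := rfl
  rw [hA, hB]
  have hsu : SuA = PySem.Set.ofList outU := by
    rw [hSuA, houtU]; exact sepset_eq_ofList L up 0 []
  have hsd : SdA = PySem.Set.ofList outD := by
    rw [hSdA, houtD]; exact sepset_eq_ofList L dn 0 []
  have hseps : sepsA = pvMKeys U D := by
    rw [hsepsA, hsu, hsd, hUdef, hDdef]; exact seps_eq_pvMKeys outU outD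
  have hUpw : U.Pairwise (· < ·) := by rw [hUdef]; exact PySem.List.sorted_ofList_pairwise_lt outU
  have hDpw : D.Pairwise (· < ·) := by rw [hDdef]; exact PySem.List.sorted_ofList_pairwise_lt outD
  have hmin := PySem.List.foldl_min_le (U ++ D) 0
  set b : Int := (U ++ D).foldl min 0 - 1 with hb
  have hbU : ∀ x ∈ U, b < x := fun x hx => by
    have := hmin.2 x (List.mem_append_left _ hx); omega
  have hbD : ∀ x ∈ D, b < x := fun x hx => by
    have := hmin.2 x (List.mem_append_right _ hx); omega
  have hUmem : ∀ x, x ∈ U ↔ x ∈ SuA := fun x => by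
    rw [hsu, hUdef]; simp [PySem.List.mem_sorted]
  have hDmem : ∀ x, x ∈ D ↔ x ∈ SdA := fun x => by
    rw [hsd, hDdef]; simp [PySem.List.mem_sorted]
  have hmain := main_fold dc.toList cuS.toList cdS.toList cbS.toList rtS.toList L SuA SdA
    U D 0 lc.toList b (PySem.List.pyGet? sepsA (-1)) hUpw hDpw hbU hbD
    (fun x hx => (hUmem x).mp hx) (fun x hx => (hDmem x).mp hx)
    (fun x hx => Or.inl ((hUmem x).mpr hx)) (fun x hx => Or.inl ((hDmem x).mpr hx))
    (by rw [← hseps, pyGet?_neg_one]; exact fun _ => rfl)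
  rw [hseps] at hmain ⊢
  rw [hmain, join_nil_eq_flatten, List.flatten_cons]
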